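-- pv_equiv track=rewrite | github.com/TimurSh18/pythonHomework | ex_09.py | findNeed
-- ===== SOURCE A (Python) =====
-- def findNeed(spisok):
--     last_list = []
--     min = spisok[0]
--     last_list.append(min)
--     max = spisok[0]
--     for i in spisok:
--         if i > max and i == spisok[len(spisok)-1]:
--             max = i
--             last_list.append(max)
--     return last_list
-- ===== SOURCE B (Python) =====
-- def findNeed(spisok):
--     result = [spisok[0]]
--     if spisok[-1] > spisok[0]:
--         result.append(spisok[-1])
--     return result
-- ===== Notes on version B (the rewrite author's own statement) =====
-- stated objective: simpler
-- what changed: Replaced the whole-list scan maintaining a running max with a direct comparison of the first and last elements, which provably yields the same output.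
import Mathlib
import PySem

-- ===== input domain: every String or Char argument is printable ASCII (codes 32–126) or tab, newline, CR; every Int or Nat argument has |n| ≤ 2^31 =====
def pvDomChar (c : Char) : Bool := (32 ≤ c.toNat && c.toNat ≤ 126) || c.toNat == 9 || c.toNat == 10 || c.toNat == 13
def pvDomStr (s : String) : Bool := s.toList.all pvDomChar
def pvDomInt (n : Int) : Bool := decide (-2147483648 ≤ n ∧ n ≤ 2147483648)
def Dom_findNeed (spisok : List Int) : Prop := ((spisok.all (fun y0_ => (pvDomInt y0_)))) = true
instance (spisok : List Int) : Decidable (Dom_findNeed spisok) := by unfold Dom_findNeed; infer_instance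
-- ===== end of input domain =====

-- ===== PORT A =====
-- B replaces A's whole-list running-max scan by a direct first/last comparison; same output proved.
-- Equivalence is about the return value; Pre_ excludes the empty list, on which both raise IndexError.
def findNeedStep (last : Int) (st : List Int × Int) (i : Int) : List Int × Int :=
  if i > st.2 && i == last then (st.1 ++ [i], i) else st

def findNeed (spisok : List Int) : List Int :=
  let mn := (PySem.List.pyGet? spisok 0).getD 0
  let mx := mn
  let last := (PySem.List.pyGet? spisok ((spisok.length : Int) - 1)).getD 0
  (spisok.foldl (findNeedStep last) ([mn], mx)).1

-- ===== PORT B =====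
def findNeed_alt (spisok : List Int) : List Int :=
  let first := (PySem.List.pyGet? spisok 0).getD 0
  let last := (PySem.List.pyGet? spisok (-1)).getD 0
  let result := [first]
  if last > first then result ++ [last] else result

-- ===== PRECONDITION & SPEC =====
-- Pre_ excludes exactly the empty list: both programs raise IndexError on it when reading the first element.
def Pre_findNeed (spisok : List Int) : Prop := spisok ≠ []
instance (spisok : List Int) : Decidable (Pre_findNeed spisok) := by unfold Pre_findNeed; infer_instance
def pvWitness_findNeed : List Int := [3, 1, 7]

def Spec_findNeed (spisok : List Int) (out : List Int) : Prop := out = findNeed_alt spisok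
instance (spisok : List Int) (out : List Int) : Decidable (Spec_findNeed spisok out) := by unfold Spec_findNeed; infer_instance

-- ===== CLAIM (what is proved, stated in full; the proofs are below) =====
def Claim_equal_findNeed : Prop := ∀ (spisok : List Int), Dom_findNeed spisok → Pre_findNeed spisok → Spec_findNeed spisok (findNeed spisok)

-- ===== LEMMAS AND PROOFS =====

-- once the running max has reached `last`, the fold changes nothing
theorem findNeed_fold_ge (last : Int) (l : List Int) (acc : List Int) (m : Int)
    (h : last ≤ m) : l.foldl (findNeedStep last) (acc, m) = (acc, m) := by
  induction l with
  | nil => rfl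
  | cons x xs ih =>
    simp only [List.foldl_cons, findNeedStep]
    have : ¬ (x > m ∧ x = last) := by rintro ⟨h1, rfl⟩; omega
    by_cases hx : x > m ∧ x = last
    · exact absurd hx this
    · have : (decide (x > m) && (x == last)) = false := by
        simp only [Bool.and_eq_false_iff, decide_eq_false_iff_not, beq_eq_false_iff_ne]
        omega
      rw [this]; simp only [if_neg Bool.false_ne_true]; exact ih

-- if m < last and last occurs in the remainder, the fold appends last exactly once
theorem findNeed_fold_lt (last : Int) (l : List Int) (acc : List Int) (m : Int)
    (hm : m < last) (hmem : last ∈ l) :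
    l.foldl (findNeedStep last) (acc, m) = (acc ++ [last], last) := by
  induction l generalizing acc m with
  | nil => cases hmem
  | cons x xs ih =>
    simp only [List.foldl_cons, findNeedStep]
    by_cases hx : x = last
    · subst hx
      have : (decide (x > m) && (x == x)) = true := by simp; omega
      rw [this]; simp only [if_pos]
      exact findNeed_fold_ge x xs (acc ++ [x]) x le_rfl
    · have hmem' : last ∈ xs := by
        rcases List.mem_cons.mp hmem with h | h
        · exact absurd h.symm hx
        · exact h
      have : (x == last) = false := by simp [hx]
      rw [this]; simp only [Bool.and_false, if_neg Bool.false_ne_true]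
      exact ih acc m hm hmem'

theorem pyGet_zero (x : Int) (xs : List Int) :
    (PySem.List.pyGet? (x :: xs) 0).getD 0 = x := by
  simp [PySem.List.pyGet?, PySem.List.pyIdx?]

theorem pyGet_last (x : Int) (xs : List Int) :
    (PySem.List.pyGet? (x :: xs) (((x :: xs).length : Int) - 1)).getD 0
      = (x :: xs).getLast (by simp) := by
  have h : ((x :: xs).length : Int) - 1 = ((xs.length : Nat) : Int) := by simp
  rw [h, PySem.List.pyGet?_natCast]
  rw [List.getElem?_eq_getElem (by simp)]
  simp only [Option.getD_some, List.getLast_eq_getElem, List.length_cons,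
    Nat.add_sub_cancel]
  rfl

theorem pyGet_neg_one (x : Int) (xs : List Int) :
    (PySem.List.pyGet? (x :: xs) (-1)).getD 0 = (x :: xs).getLast (by simp) := by
  rw [PySem.List.pyGet?_neg_one]
  rw [show (x :: xs).getLast? = some ((x :: xs).getLast (by simp)) from
    (List.getLast?_eq_getLast_of_ne_nil (by simp))]
  rfl

-- ===== VERDICT (by name: the statement is the Claim_ definition above) =====
theorem findNeed_spec : Claim_equal_findNeed := by
  intro spisok _ hpre
  unfold Spec_findNeed findNeed findNeed_alt
  cases spisok with
  | nil => exact absurd rfl hpre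
  | cons x xs =>
    simp only [pyGet_zero, pyGet_last, pyGet_neg_one]
    set L := (x :: xs).getLast (by simp) with hL
    have hmem : L ∈ x :: xs := List.getLast_mem _
    by_cases h : x < L
    · rw [findNeed_fold_lt L (x :: xs) [x] x h hmem, if_pos h]
    · rw [findNeed_fold_ge L (x :: xs) [x] x (by omega), if_neg h]
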